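-- pv_equiv track=rewrite | github.com/prki/Follow_the_white_rabbit | white_rabbit.py | filter_more_characters
-- ===== SOURCE A (Python) =====
-- def filter_more_characters(words, anagram):
--     """ Filters the words which contain a symbol more times than it is present
--     in the anagram.
--     """
--     ret = []
--     append_flag = True
--     for word in words:
--         word_chars = list(word)
--         anagram_chars = list(anagram)
--         word_chars_set = set(word)
--         for char in word_chars_set:
--             if word_chars.count(char) > anagram_chars.count(char):
--                 append_flag = False
--                 break
--         if append_flag:
--             ret.append(word)
--         append_flag = True
--
--     return ret
-- ===== SOURCE B (Python) =====
-- def filter_more_characters(words, anagram):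
--     """ Filters the words which contain a symbol more times than it is present
--     in the anagram.
--     """
--     limits = {}
--     for ch in anagram:
--         limits[ch] = limits.get(ch, 0) + 1
--     ret = []
--     for word in words:
--         counts = {}
--         ok = True
--         for ch in word:
--             n = counts.get(ch, 0) + 1
--             counts[ch] = n
--             if n > limits.get(ch, 0):
--                 ok = False
--                 break
--         if ok:
--             ret.append(word)
--     return ret
-- ===== Notes on version B (the rewrite author's own statement) =====
-- stated objective: faster
-- what changed: B builds a char-limit dict from the anagram once and scans each word character-by-character with an incremental running tally that breaks on the first overflow, instead of A's per-word distinct-char set with repeated list.count passes over both the word and the anagram.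
import Mathlib
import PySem

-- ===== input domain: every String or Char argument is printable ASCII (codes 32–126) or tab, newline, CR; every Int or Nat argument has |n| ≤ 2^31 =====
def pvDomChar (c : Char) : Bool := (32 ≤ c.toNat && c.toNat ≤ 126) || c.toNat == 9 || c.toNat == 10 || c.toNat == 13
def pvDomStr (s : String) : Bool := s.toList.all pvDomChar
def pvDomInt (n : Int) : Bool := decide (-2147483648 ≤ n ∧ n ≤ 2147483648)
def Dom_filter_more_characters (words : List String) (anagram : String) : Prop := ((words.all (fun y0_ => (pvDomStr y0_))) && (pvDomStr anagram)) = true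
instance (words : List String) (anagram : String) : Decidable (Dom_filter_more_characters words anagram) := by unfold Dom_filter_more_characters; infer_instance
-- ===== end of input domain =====

-- B replaces A's per-word distinct-char set with repeated list.count scans by a limits
-- dict built once from the anagram plus an incremental per-word running tally (objective: faster).

-- ===== PORT A =====
-- inner 'for char in word_chars_set: … break' loop of A (result is independent of the
-- set's iteration order: the loop only decides whether some violating char exists)
def pvCheckA (wc ac : List Char) : List Char → Bool
  | [] => true
  | c :: rest => if wc.count c > ac.count c then false else pvCheckA wc ac rest

def filter_more_characters (words : List String) (anagram : String) : List String :=
  words.foldl (fun ret word =>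
    let word_chars := word.toList
    let anagram_chars := anagram.toList
    let word_chars_set : PySem.Set Char := PySem.Set.ofList word.toList
    if pvCheckA word_chars anagram_chars word_chars_set then ret ++ [word] else ret) []

-- ===== PORT B =====
-- inner 'for ch in word: … break' loop of B with the running-count dict
def pvCheckB (limits : PySem.Dict Char Int) : PySem.Dict Char Int → List Char → Bool
  | _, [] => true
  | counts, c :: rest =>
    let n := counts.getD c 0 + 1
    if n > limits.getD c 0 then false
    else pvCheckB limits (counts.insert c n) rest

def filter_more_characters_alt (words : List String) (anagram : String) : List String :=
  let limits := anagram.toList.foldl (fun d ch => d.insert ch (d.getD ch 0 + 1)) PySem.Dict.empty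
  words.foldl (fun ret word =>
    if pvCheckB limits PySem.Dict.empty word.toList then ret ++ [word] else ret) []

-- ===== PRECONDITION & SPEC =====
def Spec_filter_more_characters (words : List String) (anagram : String) (out : List String) : Prop := out = filter_more_characters_alt words anagram
instance (words : List String) (anagram : String) (out : List String) : Decidable (Spec_filter_more_characters words anagram out) := by unfold Spec_filter_more_characters; infer_instance

-- ===== CLAIM (what is proved, stated in full; the proofs are below) =====
def Claim_equal_filter_more_characters : Prop := ∀ (words : List String) (anagram : String), Dom_filter_more_characters words anagram → Spec_filter_more_characters words anagram (filter_more_characters words anagram)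

-- ===== LEMMAS AND PROOFS =====

theorem pvCheckA_iff (wc ac : List Char) (s : List Char) :
    pvCheckA wc ac s = true ↔ ∀ c ∈ s, wc.count c ≤ ac.count c := by
  induction s with
  | nil => simp [pvCheckA]
  | cons c rest ih =>
    simp only [pvCheckA, List.mem_cons]
    split_ifs with h
    · constructor
      · intro hf; cases hf
      · intro hall; exact absurd (hall c (Or.inl rfl)) (by omega)
    · simp only [ih]
      constructor
      · intro hall x hx
        rcases hx with rfl | hx
        · omega
        · exact hall x hx
      · intro hall x hx; exact hall x (Or.inr hx)

theorem pvCheckB_iff (L : PySem.Dict Char Int) (cs : List Char) (d : PySem.Dict Char Int) :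
    pvCheckB L d cs = true ↔ ∀ c ∈ cs, d.getD c 0 + (cs.count c : Int) ≤ L.getD c 0 := by
  induction cs generalizing d with
  | nil => simp [pvCheckB]
  | cons c rest ih =>
    simp only [pvCheckB]
    split_ifs with h
    · simp only [false_iff]
      intro hall
      have h1 := hall c (by simp)
      have hc : 1 ≤ (c :: rest).count c := by simp
      omega
    · rw [ih]
      constructor
      · intro hall x hx
        have hcx := List.mem_cons.mp hx
        by_cases hxc : x = c
        · subst hxc
          by_cases hm : x ∈ rest
          · have h2 := hall x hm
            simp at h2
            simp only [List.count_cons_self]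
            push_cast at h2 ⊢
            omega
          · simp only [List.count_cons_self, List.count_eq_zero_of_not_mem hm]
            push_cast
            omega
        · have h2 := hall x (hcx.resolve_left hxc)
          have hg : (d.insert c (d.getD c 0 + 1)).getD x 0 = d.getD x 0 := by
            simp [PySem.Dict.getD_insert, hxc]
          have hcount : (c :: rest).count x = rest.count x := by
            have hcx2 : c ≠ x := fun hh => hxc hh.symm
            simp [hcx2]
          rw [hg] at h2
          rw [hcount]
          exact h2
      · intro hall x hx
        by_cases hxc : x = c
        · subst hxc
          have h2 := hall x (by simp)
          simp only [List.count_cons_self] at h2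
          simp
          push_cast at h2 ⊢
          omega
        · have h2 := hall x (List.mem_cons_of_mem _ hx)
          have hg : (d.insert c (d.getD c 0 + 1)).getD x 0 = d.getD x 0 := by
            simp [PySem.Dict.getD_insert, hxc]
          have hcount : (c :: rest).count x = rest.count x := by
            have hcx2 : c ≠ x := fun hh => hxc hh.symm
            simp [hcx2]
          rw [hcount] at h2
          rw [hg]
          exact h2

theorem limits_getD (anagram : String) (c : Char) :
    (anagram.toList.foldl (fun d ch => d.insert ch (d.getD ch 0 + 1)) PySem.Dict.empty).getD c 0
      = (anagram.toList.count c : Int) := by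
  rw [PySem.Dict.foldl_insert_getD_add_one_eq_counter, PySem.Dict.getD_counter]

theorem check_agree (word anagram : String) :
    pvCheckA word.toList anagram.toList (PySem.Set.ofList word.toList)
      = pvCheckB (anagram.toList.foldl (fun d ch => d.insert ch (d.getD ch 0 + 1)) PySem.Dict.empty)
          PySem.Dict.empty word.toList := by
  rcases hA : pvCheckA word.toList anagram.toList (PySem.Set.ofList word.toList) with _ | _
  · rcases hB : pvCheckB _ PySem.Dict.empty word.toList with _ | _
    · rfl
    · exfalso
      rw [pvCheckB_iff] at hB
      have hA' : ¬ ∀ c ∈ PySem.Set.ofList word.toList,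
          word.toList.count c ≤ anagram.toList.count c := by
        intro h; rw [← pvCheckA_iff] at h; rw [hA] at h; cases h
      apply hA'
      intro c hc
      have hc' : c ∈ word.toList := (PySem.Set.mem_ofList _ _).mp hc
      have := hB c hc'
      rw [PySem.Dict.getD_empty, limits_getD] at this
      exact_mod_cast (by omega : (word.toList.count c : Int) ≤ (anagram.toList.count c : Int))
  · rcases hB : pvCheckB _ PySem.Dict.empty word.toList with _ | _
    · exfalso
      rw [pvCheckA_iff] at hA
      have hB' : ¬ ∀ c ∈ word.toList,
          (PySem.Dict.empty : PySem.Dict Char Int).getD c 0 + (word.toList.count c : Int)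
            ≤ (anagram.toList.foldl (fun d ch => d.insert ch (d.getD ch 0 + 1)) PySem.Dict.empty).getD c 0 := by
        intro h; rw [← pvCheckB_iff] at h; rw [hB] at h; cases h
      apply hB'
      intro c hc
      have := hA c ((PySem.Set.mem_ofList _ _).mpr hc)
      rw [PySem.Dict.getD_empty, limits_getD]
      have : (word.toList.count c : Int) ≤ (anagram.toList.count c : Int) := by exact_mod_cast this
      omega
    · rfl

-- ===== VERDICT (by name: the statement is the Claim_ definition above) =====
theorem filter_more_characters_spec : Claim_equal_filter_more_characters := by
  intro words anagram _
  unfold Spec_filter_more_characters filter_more_characters filter_more_characters_alt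
  simp only []
  congr 1
  funext ret word
  rw [check_agree]
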